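-- pv_equiv track=rewrite | github.com/weiyangzen/awesome_algorithms | Algorithms/数学-数论-0001-欧几里得算法_(Euclidean_Algorithm)/demo.py | gcd_trace
-- ===== SOURCE A (Python) =====
-- from typing import List, Tuple
--
-- def gcd_trace(a: int, b: int) -> List[Tuple[int, int, int, int]]:
--     """Return the division trace as (a, b, q, r) for each iteration."""
--     trace: List[Tuple[int, int, int, int]] = []
--     a, b = abs(a), abs(b)
--
--     while b != 0:
--         q, r = divmod(a, b)
--         trace.append((a, b, q, r))
--         a, b = b, r
--
--     trace.append((a, 0, 0, 0))
--     return trace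
-- ===== SOURCE B (Python) =====
-- def gcd_trace(a, b):
--     """Return the division trace as (a, b, q, r) for each iteration."""
--     chain = [abs(a), abs(b)]
--     while chain[-1] != 0:
--         chain.append(chain[-2] % chain[-1])
--     return [(chain[i], chain[i + 1], chain[i] // chain[i + 1], chain[i + 2])
--             for i in range(len(chain) - 2)] + [(chain[-2], 0, 0, 0)]
-- ===== Notes on version B (the rewrite author's own statement) =====
-- stated objective: alternative
-- what changed: Replaces A's single while-loop that appends (a,b,q,r) rows by a two-stage pass: first build the Euclidean remainder chain [|a|,|b|,r1,...,0], then derive every trace row by indexing adjacent chain entries in a comprehension.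
import Mathlib
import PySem

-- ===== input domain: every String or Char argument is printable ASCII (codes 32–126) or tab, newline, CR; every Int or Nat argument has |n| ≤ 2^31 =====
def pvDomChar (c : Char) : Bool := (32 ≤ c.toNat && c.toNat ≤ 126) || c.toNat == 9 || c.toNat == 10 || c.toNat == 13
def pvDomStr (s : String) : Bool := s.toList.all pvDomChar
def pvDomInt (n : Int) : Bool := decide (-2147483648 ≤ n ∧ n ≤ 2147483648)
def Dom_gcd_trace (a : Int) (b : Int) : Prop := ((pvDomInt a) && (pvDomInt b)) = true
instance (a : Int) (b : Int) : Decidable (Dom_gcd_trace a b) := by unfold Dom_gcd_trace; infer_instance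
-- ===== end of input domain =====

-- B replaces A's single while-loop building the trace by a two-stage pass: it first
-- builds the remainder chain, then derives each (a,b,q,r) row by indexing adjacent
-- chain entries; alternative decomposition, same cost.


-- termination measure lemma used by both ports' recursions
theorem pv_mod_natAbs_lt (a b : Int) (h : b ≠ 0) :
    (PySem.Int.mod a b).natAbs < b.natAbs := by
  rcases lt_trichotomy b 0 with hb | hb | hb
  · have := PySem.Int.mod_neg_bounds a hb
    omega
  · exact absurd hb h
  · have h1 := PySem.Int.mod_nonneg a hb
    have h2 := PySem.Int.mod_lt a hb
    omega

-- ===== PORT A =====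
-- the while loop of A, with its accumulator list 'trace'
def gcdLoopA (a b : Int) (trace : List (Int × Int × Int × Int)) :
    List (Int × Int × Int × Int) :=
  if h : b ≠ 0 then
    let q := PySem.Int.floordiv a b
    let r := PySem.Int.mod a b
    gcdLoopA b r (trace ++ [(a, b, q, r)])
  else
    trace ++ [(a, 0, 0, 0)]
termination_by b.natAbs
decreasing_by exact pv_mod_natAbs_lt a b h

def gcd_trace (a : Int) (b : Int) : List (Int × Int × Int × Int) :=
  gcdLoopA a.natAbs b.natAbs []

-- ===== PORT B =====
-- stage 1 of Source B: the remainder chain [abs a, abs b, r1, r2, …, 0]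
-- (the python while-loop appending chain[-2] % chain[-1], carried as the last two entries)
def pvChain (x y : Int) : List Int :=
  if h : y = 0 then [x, y]
  else x :: pvChain y (PySem.Int.mod x y)
termination_by y.natAbs
decreasing_by exact pv_mod_natAbs_lt x y h

-- stage 2 of Source B: the comprehension over range(len(chain)-2) plus the final row
def pvMkTrace (chain : List Int) : List (Int × Int × Int × Int) :=
  (List.range (chain.length - 2)).map (fun i =>
    (chain.getD i 0, chain.getD (i + 1) 0,
     PySem.Int.floordiv (chain.getD i 0) (chain.getD (i + 1) 0),
     chain.getD (i + 2) 0))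
  ++ [(chain.getD (chain.length - 2) 0, 0, 0, 0)]

def gcd_trace_alt (a : Int) (b : Int) : List (Int × Int × Int × Int) :=
  pvMkTrace (pvChain a.natAbs b.natAbs)

-- ===== PRECONDITION & SPEC =====
def Spec_gcd_trace (a : Int) (b : Int) (out : List (Int × Int × Int × Int)) : Prop := out = gcd_trace_alt a b
instance (a : Int) (b : Int) (out : List (Int × Int × Int × Int)) : Decidable (Spec_gcd_trace a b out) := by unfold Spec_gcd_trace; infer_instance

-- ===== CLAIM =====
def Claim_equal_gcd_trace : Prop := ∀ (a : Int) (b : Int), Dom_gcd_trace a b → Spec_gcd_trace a b (gcd_trace a b)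

-- ===== LEMMAS AND PROOFS =====
-- common recursive characterisation of the trace, used only by the proofs
def stepsR (x y : Int) : List (Int × Int × Int × Int) :=
  if h : y = 0 then [(x, 0, 0, 0)]
  else (x, y, PySem.Int.floordiv x y, PySem.Int.mod x y) :: stepsR y (PySem.Int.mod x y)
termination_by y.natAbs
decreasing_by exact pv_mod_natAbs_lt x y h

theorem gcdLoopA_eq (a b : Int) (trace : List (Int × Int × Int × Int)) :
    gcdLoopA a b trace = trace ++ stepsR a b := by
  induction a, b, trace using gcdLoopA.induct with
  | case1 a b trace h q r ih =>
      rw [gcdLoopA, stepsR]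
      simp only [dif_pos h, dif_neg h]
      rw [ih]
      simp only [List.append_assoc, List.singleton_append]
      rfl
  | case2 a b trace h =>
      have hb : b = 0 := by omega
      subst hb
      rw [gcdLoopA, stepsR]
      simp

theorem pvChain_len (x y : Int) : 2 ≤ (pvChain x y).length := by
  induction x, y using pvChain.induct with
  | case1 x => rw [pvChain]; simp
  | case2 x y h ih => rw [pvChain]; simp [h]; omega

theorem pvChain_get0 (x y : Int) : (pvChain x y).getD 0 0 = x := by
  rw [pvChain]; split <;> rfl

theorem pvChain_get1 (x y : Int) : (pvChain x y).getD 1 0 = y := by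
  rw [pvChain]
  split
  · next h => simp [h]
  · simpa using pvChain_get0 _ _

theorem pvMkTrace_cons (x : Int) (c : List Int) (h : 2 ≤ c.length) :
    pvMkTrace (x :: c) =
      (x, c.getD 0 0, PySem.Int.floordiv x (c.getD 0 0), c.getD 1 0) :: pvMkTrace c := by
  unfold pvMkTrace
  have hl : (x :: c).length - 2 = (c.length - 2) + 1 := by simp; omega
  rw [hl, List.range_succ_eq_map, List.map_cons, List.map_map]
  simp [Function.comp]

theorem pvMkTrace_chain (x y : Int) : pvMkTrace (pvChain x y) = stepsR x y := by
  induction x, y using pvChain.induct with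
  | case1 x =>
      rw [pvChain, stepsR]
      simp [pvMkTrace]
  | case2 x y h ih =>
      rw [pvChain, stepsR]
      simp only [dif_neg h]
      rw [pvMkTrace_cons x _ (pvChain_len _ _), pvChain_get0, pvChain_get1, ih]

-- ===== VERDICT =====
theorem gcd_trace_spec : Claim_equal_gcd_trace := by
  intro a b _
  unfold Spec_gcd_trace gcd_trace gcd_trace_alt
  rw [pvMkTrace_chain, gcdLoopA_eq]
  simp
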